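-- pv_equiv track=rewrite | github.com/Hydrodynamical/PDE_Learning | plot_hackathon.py | group_by_model
-- ===== SOURCE A (Python) =====
-- from collections import defaultdict
--
-- def group_by_model(runs, difficulty=None):
--     """Group runs by model, optionally filtering by difficulty. Returns {model: [runs]}."""
--     grouped = defaultdict(list)
--     for r in runs:
--         cfg = r.get("config", {})
--         if difficulty and cfg.get("difficulty") != difficulty:
--             continue
--         grouped[cfg.get("model", "unknown")].append(r)
--     return dict(grouped)
-- ===== SOURCE B (Python) =====
-- def group_by_model(runs, difficulty=None):
--     """Group runs by model, optionally filtering by difficulty. Returns {model: [runs]}."""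
--     def model_of(r):
--         return r.get("config", {}).get("model", "unknown")
--     if difficulty:
--         kept = [r for r in runs if r.get("config", {}).get("difficulty") == difficulty]
--     else:
--         kept = list(runs)
--     order = list(dict.fromkeys(model_of(r) for r in kept))
--     return {m: [r for r in kept if model_of(r) == m] for m in order}
-- ===== Notes on version B (the rewrite author's own statement) =====
-- stated objective: alternative
-- what changed: A builds the groups in one pass through a defaultdict keyed on the fly; B first filters the runs, then computes the first-occurrence list of model names with dict.fromkeys and rebuilds each group by a per-model scan of the filtered list.
import Mathlib
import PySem

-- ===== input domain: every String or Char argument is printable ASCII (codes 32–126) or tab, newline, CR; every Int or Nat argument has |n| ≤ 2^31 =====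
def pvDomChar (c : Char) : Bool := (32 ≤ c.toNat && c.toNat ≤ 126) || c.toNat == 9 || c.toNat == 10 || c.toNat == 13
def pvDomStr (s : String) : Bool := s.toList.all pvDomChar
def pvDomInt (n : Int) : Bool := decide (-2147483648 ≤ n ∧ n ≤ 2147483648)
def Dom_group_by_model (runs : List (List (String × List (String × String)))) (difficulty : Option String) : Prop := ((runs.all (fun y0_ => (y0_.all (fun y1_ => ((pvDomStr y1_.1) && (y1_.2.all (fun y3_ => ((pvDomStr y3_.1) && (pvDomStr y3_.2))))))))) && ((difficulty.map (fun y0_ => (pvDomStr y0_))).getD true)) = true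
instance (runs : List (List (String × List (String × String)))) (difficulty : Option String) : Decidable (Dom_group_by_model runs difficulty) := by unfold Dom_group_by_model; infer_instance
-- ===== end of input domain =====

-- B replaces A's one-pass defaultdict grouping by filter-then-dedup-keys-then-per-model-scan
-- (alternative decomposition, not faster; same return value).

-- shared Python-dict lookup on an association list (first match), used by both ports:
-- exact for `d.get(k)` under the assoc-list convention
def pvLookup {α : Type} (d : List (String × α)) (k : String) : Option α :=
  (d.find? (fun p => p.1 == k)).map (·.2)

-- ===== PORT A =====
-- Python truthiness of the `difficulty` parameter (None or "" is falsy)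
def pvTruthy (difficulty : Option String) : Bool :=
  match difficulty with
  | none => false
  | some s => decide (s ≠ "")

def group_by_model (runs : List (List (String × List (String × String)))) (difficulty : Option String) : List (String × List (List (String × List (String × String)))) :=
  (runs.foldl
    (fun grouped r =>
      let cfg := (pvLookup r "config").getD []
      if pvTruthy difficulty && (pvLookup cfg "difficulty" != difficulty) then grouped
      else grouped.modify ((pvLookup cfg "model").getD "unknown") [] (· ++ [r]))
    PySem.Dict.empty).items

-- ===== PORT B =====
def pvModelOf (r : List (String × List (String × String))) : String :=
  (pvLookup ((pvLookup r "config").getD []) "model").getD "unknown"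

def group_by_model_alt (runs : List (List (String × List (String × String)))) (difficulty : Option String) : List (String × List (List (String × List (String × String)))) :=
  let kept :=
    match difficulty with
    | some s =>
        if s ≠ "" then
          runs.filter (fun r => pvLookup ((pvLookup r "config").getD []) "difficulty" == some s)
        else runs
    | none => runs
  (PySem.List.dedup (kept.map pvModelOf)).map
    (fun m => (m, kept.filter (fun r => pvModelOf r == m)))

-- ===== PRECONDITION & SPEC =====
def Spec_group_by_model (runs : List (List (String × List (String × String)))) (difficulty : Option String) (out : List (String × List (List (String × List (String × String))))) : Prop := out = group_by_model_alt runs difficulty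
instance (runs : List (List (String × List (String × String)))) (difficulty : Option String) (out : List (String × List (List (String × List (String × String))))) : Decidable (Spec_group_by_model runs difficulty out) := by
  unfold Spec_group_by_model
  letI d1 : DecidableEq (List (String × List (String × String))) := inferInstance
  letI d2 : DecidableEq (List (List (String × List (String × String)))) := inferInstance
  letI d3 : DecidableEq (String × List (List (String × List (String × String)))) := inferInstance
  letI d4 : DecidableEq (List (String × List (List (String × List (String × String))))) := inferInstance
  exact d4 _ _

-- ===== CLAIM (what is proved, stated in full; the proofs are below) =====
def Claim_equal_group_by_model : Prop := ∀ (runs : List (List (String × List (String × String)))) (difficulty : Option String), Dom_group_by_model runs difficulty → Spec_group_by_model runs difficulty (group_by_model runs difficulty)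

-- ===== LEMMAS AND PROOFS =====

-- `continue` in a fold is a pre-filter
theorem foldl_skip {α β : Type} (p : α → Bool) (f : β → α → β) :
    ∀ (l : List α) (init : β),
      l.foldl (fun acc x => if p x then acc else f acc x) init
        = (l.filter (fun x => !p x)).foldl f init := by
  intro l
  induction l with
  | nil => intro init; rfl
  | cons x xs ih =>
      intro init
      by_cases h : p x = true <;> simp [h, ih]

-- the filtered survivors agree between the two ports
theorem kept_eq (runs : List (List (String × List (String × String)))) (difficulty : Option String) :
    runs.filter (fun r =>
      !(pvTruthy difficulty
          && (pvLookup ((pvLookup r "config").getD []) "difficulty" != difficulty)))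
      = (match difficulty with
         | some s =>
             if s ≠ "" then
               runs.filter (fun r =>
                 pvLookup ((pvLookup r "config").getD []) "difficulty" == some s)
             else runs
         | none => runs) := by
  match difficulty with
  | none => simp [pvTruthy]
  | some s =>
      by_cases hs : s = ""
      · simp [pvTruthy, hs]
      · simp only [hs, ne_eq, not_false_eq_true, if_pos]
        apply List.filter_congr
        intro r _
        simp [pvTruthy, hs, bne]

-- the grouping fold, characterised: items = first-occurrence models, each with its scan
theorem grouping_eq (kept : List (List (String × List (String × String)))) :
    (kept.foldl
      (fun grouped r => grouped.modify (pvModelOf r) [] (· ++ [r]))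
      (PySem.Dict.empty (κ := String))).items
      = (PySem.Set.ofList (kept.map pvModelOf)).map
          (fun m => (m, kept.filter (fun r => pvModelOf r == m))) := by
  have hkeys :
      (kept.foldl (fun grouped r => grouped.modify (pvModelOf r) [] (· ++ [r]))
        (PySem.Dict.empty (κ := String))).keys
        = PySem.Set.ofList (kept.map pvModelOf) := by
    rw [PySem.Dict.keys_foldl_modify_key kept pvModelOf [] (fun _ r => (· ++ [r]))]
    simp [PySem.Set.update_nil_left, PySem.Dict.keys_empty]
  have hnd :
      (kept.foldl (fun grouped r => grouped.modify (pvModelOf r) [] (· ++ [r]))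
        (PySem.Dict.empty (κ := String))).keys.Nodup := by
    rw [hkeys]; exact PySem.Set.nodup_ofList _
  rw [PySem.Dict.items_eq_map_keys _ hnd [], hkeys]
  apply List.map_congr_left
  intro m _
  have hfold :
      kept.foldl (fun grouped r => grouped.modify (pvModelOf r) [] (· ++ [r]))
        (PySem.Dict.empty (κ := String))
        = (kept.map (fun r => (pvModelOf r, r))).foldl
            (fun grouped p => grouped.modify p.1 [] (· ++ [p.2]))
            (PySem.Dict.empty (κ := String)) := by
    rw [List.foldl_map]
  rw [hfold, PySem.Dict.getD_foldl_modify_append]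
  simp [PySem.Dict.getD_empty, List.filter_map, Function.comp_def, List.map_map]

-- ===== VERDICT (by name: the statement is the Claim_ definition above) =====
theorem group_by_model_spec : Claim_equal_group_by_model := by
  intro runs difficulty _
  show group_by_model runs difficulty = group_by_model_alt runs difficulty
  unfold group_by_model group_by_model_alt
  rw [foldl_skip, kept_eq]
  simp only [PySem.List.dedup_eq_ofList]
  exact grouping_eq _
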